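-- pv_equiv track=rewrite | github.com/nikhilc11/python | workspace/PythonLearningProject/geeksforgeeks/check_if_array_contains_all_elements_in_given_range.py | check_elements_in_range
-- ===== SOURCE A (Python) =====
-- def check_elements_in_range(array, lower_bound, higher_bound):
--     flag_array = [0] * (higher_bound-lower_bound+1)
--     for element in array:
--         if lower_bound <= element <= higher_bound:
--             flag_array[element-lower_bound] = 1
--     if sum(flag_array) == len(flag_array):
--         return True
--     else:
--         return False
-- ===== SOURCE B (Python) =====
-- def check_elements_in_range(array, lower_bound, higher_bound):
--     # Sort, then scan for the next needed value; a sorted gap means failure.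
--     if lower_bound > higher_bound:
--         return True
--     need = lower_bound
--     for v in sorted(array):
--         if v < need:
--             continue
--         if v == need:
--             need += 1
--             if need > higher_bound:
--                 return True
--         else:
--             return False
--     return False
-- ===== Notes on version B (the rewrite author's own statement) =====
-- stated objective: alternative
-- what changed: Replaces A's range-sized flag array (allocate, mark, sum) with sort-then-scan: sort the array and walk it once tracking the next needed value, returning False at the first gap and True once the range is exhausted.
import Mathlib
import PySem

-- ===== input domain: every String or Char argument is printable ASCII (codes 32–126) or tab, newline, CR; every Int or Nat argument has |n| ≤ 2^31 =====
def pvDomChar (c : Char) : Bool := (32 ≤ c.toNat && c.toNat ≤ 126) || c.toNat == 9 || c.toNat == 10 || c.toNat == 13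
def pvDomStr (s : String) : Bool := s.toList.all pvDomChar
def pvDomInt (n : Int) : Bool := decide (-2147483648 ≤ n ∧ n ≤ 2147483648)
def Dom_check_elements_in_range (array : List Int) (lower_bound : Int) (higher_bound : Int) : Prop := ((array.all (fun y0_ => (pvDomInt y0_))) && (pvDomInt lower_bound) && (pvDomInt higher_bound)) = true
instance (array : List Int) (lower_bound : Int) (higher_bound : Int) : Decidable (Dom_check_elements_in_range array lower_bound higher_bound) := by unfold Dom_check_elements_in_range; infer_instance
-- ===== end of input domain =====

-- B replaces A's range-sized flag array (allocate, mark, sum) with sort-then-scan: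
-- walk the sorted array once tracking the next needed value; a gap means False.

-- ===== PORT A =====
-- flag array of size (hi-lo+1) (empty when negative, as Python's [0]*k), mark in-range
-- elements (index element-lo is always in range there, so pySetD is exact), sum == length.
def check_elements_in_range (array : List Int) (lower_bound : Int) (higher_bound : Int) : Bool :=
  let flag0 : List Int := List.replicate (higher_bound - lower_bound + 1).toNat 0
  let flags := array.foldl
    (fun fl element =>
      if lower_bound ≤ element ∧ element ≤ higher_bound then
        PySem.List.pySetD fl (element - lower_bound) 1
      else fl) flag0
  decide (flags.sum = (flags.length : Int))

-- ===== PORT B =====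
-- the for-loop of Source B over the sorted list, carrying `need`; after the loop: False.
def scanB (hi : Int) : List Int → Int → Bool
  | [], _ => false
  | v :: rest, need =>
    if v < need then scanB hi rest need
    else if v = need then
      if need + 1 > hi then true else scanB hi rest (need + 1)
    else false

def check_elements_in_range_alt (array : List Int) (lower_bound : Int) (higher_bound : Int) : Bool :=
  if lower_bound > higher_bound then true
  else scanB higher_bound (PySem.List.sorted array (fun x => x) false) lower_bound

-- ===== PRECONDITION & SPEC =====
def Spec_check_elements_in_range (array : List Int) (lower_bound : Int) (higher_bound : Int) (out : Bool) : Prop := out = check_elements_in_range_alt array lower_bound higher_bound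
instance (array : List Int) (lower_bound : Int) (higher_bound : Int) (out : Bool) : Decidable (Spec_check_elements_in_range array lower_bound higher_bound out) := by unfold Spec_check_elements_in_range; infer_instance

-- ===== CLAIM (what is proved, stated in full; the proofs are below) =====
def Claim_equal_check_elements_in_range : Prop := ∀ (array : List Int) (lower_bound : Int) (higher_bound : Int), Dom_check_elements_in_range array lower_bound higher_bound → Spec_check_elements_in_range array lower_bound higher_bound (check_elements_in_range array lower_bound higher_bound)

-- ===== LEMMAS AND PROOFS =====

-- "array covers every integer of [lo, hi]" — the common characterisation of both ports.
def Covers (array : List Int) (lo hi : Int) : Prop :=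
  ∀ x : Int, lo ≤ x → x ≤ hi → x ∈ array

-- A's loop step.
def stepA (lo hi : Int) (fl : List Int) (element : Int) : List Int :=
  if lo ≤ element ∧ element ≤ hi then PySem.List.pySetD fl (element - lo) 1 else fl

theorem length_foldl_stepA (lo hi : Int) (l : List Int) (F : List Int) :
    (l.foldl (stepA lo hi) F).length = F.length := by
  induction l generalizing F with
  | nil => rfl
  | cons e l ih =>
    simp only [List.foldl_cons, ih, stepA]
    split
    · simp [PySem.List.length_pySetD]
    · rfl

theorem get_foldl_stepA (lo hi : Int) (l : List Int) (F : List Int)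
    (hlen : F.length = (hi - lo + 1).toNat) (j : Nat) (hj : j < F.length) :
    (l.foldl (stepA lo hi) F)[j]? = some (if lo + (j : Int) ∈ l then 1 else F[j]) := by
  induction l generalizing F with
  | nil => simp [List.getElem?_eq_getElem hj]
  | cons e l ih =>
    simp only [List.foldl_cons, stepA]
    by_cases he : lo ≤ e ∧ e ≤ hi
    · rw [if_pos he, PySem.List.pySetD_of_nonneg F (1:Int) (show (0:Int) ≤ e - lo by omega)]
      have hlen' : (F.set (e - lo).toNat 1).length = (hi - lo + 1).toNat := by
        simpa using hlen
      rw [ih (F.set (e - lo).toNat 1) hlen' (by simpa using hj)]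
      rw [List.getElem_set]
      by_cases hmem : lo + (j : Int) ∈ l
      · simp [hmem]
      · by_cases heq : e = lo + (j : Int)
        · have : (e - lo).toNat = j := by omega
          simp [heq, hmem]
        · have hne : ¬((e - lo).toNat = j) := by omega
          simp [hne, hmem, Ne.symm heq]
    · rw [if_neg he]
      rw [ih F hlen hj]
      have hne : e ≠ lo + (j : Int) := by
        intro h; apply he; constructor <;> omega
      by_cases hmem : lo + (j : Int) ∈ l
      · simp [hmem]
      · simp [hmem, Ne.symm hne]

-- sum = length for a 0/1 integer list iff every entry is 1
theorem sum_le_length (xs : List Int) (h : ∀ x ∈ xs, x ≤ 1) : xs.sum ≤ (xs.length : Int) := by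
  induction xs with
  | nil => simp
  | cons a xs ih =>
    have ha := h a (by simp)
    have := ih (fun x hx => h x (by simp [hx]))
    simp only [List.sum_cons, List.length_cons]
    push_cast
    omega

theorem sum_eq_length_iff (xs : List Int) (h : ∀ x ∈ xs, x = 0 ∨ x = 1) :
    xs.sum = (xs.length : Int) ↔ ∀ x ∈ xs, x = 1 := by
  induction xs with
  | nil => simp
  | cons a xs ih =>
    have ha := h a (by simp)
    have hxs : ∀ x ∈ xs, x = 0 ∨ x = 1 := fun x hx => h x (by simp [hx])
    have hle := sum_le_length xs (fun x hx => by rcases hxs x hx with h' | h' <;> omega)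
    have := ih hxs
    simp only [List.sum_cons, List.length_cons]
    push_cast
    constructor
    · intro heq
      have ha1 : a = 1 := by omega
      have : xs.sum = (xs.length : Int) := by omega
      intro x hx
      rcases List.mem_cons.mp hx with h' | h'
      · exact h' ▸ ha1
      · exact (ih hxs).mp this x h'
    · intro hall
      have ha1 : a = 1 := hall a (by simp)
      have : xs.sum = (xs.length : Int) := (ih hxs).mpr (fun x hx => hall x (by simp [hx]))
      omega

-- A = true ↔ Covers
theorem portA_iff (array : List Int) (lo hi : Int) :
    check_elements_in_range array lo hi = true ↔ Covers array lo hi := by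
  unfold check_elements_in_range
  simp only [decide_eq_true_eq]
  set n := (hi - lo + 1).toNat with hn
  set F := List.replicate n (0 : Int) with hF
  change (array.foldl (stepA lo hi) F).sum = ((array.foldl (stepA lo hi) F).length : Int) ↔ _
  have hlenF : F.length = n := by simp [hF]
  have hflen : (array.foldl (stepA lo hi) F).length = n := by
    rw [length_foldl_stepA]; exact hlenF
  have hget : ∀ j : Nat, j < n →
      (array.foldl (stepA lo hi) F)[j]? =
        some (if lo + (j : Int) ∈ array then 1 else 0) := by
    intro j hj
    have := get_foldl_stepA lo hi array F (by rw [hlenF]) j (by omega)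
    rwa [List.getElem_replicate] at this
  have hmem01 : ∀ x ∈ array.foldl (stepA lo hi) F, x = 0 ∨ x = 1 := by
    intro x hx
    obtain ⟨j, hxj⟩ := List.mem_iff_getElem?.mp hx
    have hj : j < n := by
      have := (List.getElem?_eq_some_iff.mp hxj).1; omega
    rw [hget j hj] at hxj
    have := Option.some.inj hxj
    split at this <;> omega
  have key : (array.foldl (stepA lo hi) F).sum = ((array.foldl (stepA lo hi) F).length : Int)
      ↔ ∀ j : Nat, j < n → lo + (j : Int) ∈ array := by
    rw [sum_eq_length_iff _ hmem01]
    constructor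
    · intro hall j hj
      have hmem : (if lo + (j : Int) ∈ array then (1:Int) else 0) ∈ array.foldl (stepA lo hi) F :=
        List.mem_iff_getElem?.mpr ⟨j, hget j hj⟩
      have := hall _ hmem
      by_contra hc
      simp [hc] at this
    · intro hall x hx
      obtain ⟨j, hxj⟩ := List.mem_iff_getElem?.mp hx
      have hj : j < n := by
        have := (List.getElem?_eq_some_iff.mp hxj).1; omega
      rw [hget j hj] at hxj
      have := Option.some.inj hxj
      simp [hall j hj] at this
      omega
  rw [key]
  constructor
  · intro hall x hx1 hx2
    have hj : (x - lo).toNat < n := by omega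
    have := hall (x - lo).toNat hj
    have hx : lo + ((x - lo).toNat : Int) = x := by omega
    rwa [hx] at this
  · intro hcov j hj
    exact hcov (lo + (j : Int)) (by omega) (by omega)

-- scanB on a ≤-sorted list decides coverage of [need, hi], when need ≤ hi.
theorem scanB_iff (hi : Int) (xs : List Int) (need : Int)
    (hsort : xs.Pairwise (· ≤ ·)) (hle : need ≤ hi) :
    scanB hi xs need = true ↔ Covers xs need hi := by
  induction xs generalizing need with
  | nil =>
    simp only [scanB, Covers]
    constructor
    · intro h; exact absurd h (by simp)
    · intro h; exact absurd (h need le_rfl hle) (by simp)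
  | cons v rest ih =>
    have hsort' : rest.Pairwise (· ≤ ·) := (List.pairwise_cons.mp hsort).2
    have hvle : ∀ y ∈ rest, v ≤ y := (List.pairwise_cons.mp hsort).1
    simp only [scanB]
    by_cases h1 : v < need
    · rw [if_pos h1, ih need hsort' hle]
      unfold Covers
      constructor
      · intro h x hx1 hx2; exact List.mem_cons_of_mem _ (h x hx1 hx2)
      · intro h x hx1 hx2
        rcases List.mem_cons.mp (h x hx1 hx2) with h' | h'
        · omega
        · exact h'
    · rw [if_neg h1]
      by_cases h2 : v = need
      · rw [if_pos h2]
        by_cases h3 : need + 1 > hi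
        · rw [if_pos h3]
          have hnh : need = hi := by omega
          simp only [true_iff]
          intro x hx1 hx2
          have : x = v := by omega
          simp [this]
        · rw [if_neg h3]
          rw [ih (need + 1) hsort' (by omega)]
          unfold Covers
          constructor
          · intro h x hx1 hx2
            by_cases hxv : x = v
            · simp [hxv]
            · exact List.mem_cons_of_mem _ (h x (by omega) hx2)
          · intro h x hx1 hx2
            rcases List.mem_cons.mp (h x (by omega) hx2) with h' | h'
            · omega
            · exact h'
      · rw [if_neg h2]
        simp only [Bool.false_eq_true, false_iff]
        intro h
        have : need ∈ v :: rest := h need le_rfl hle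
        rcases List.mem_cons.mp this with h' | h'
        · omega
        · have := hvle need h'; omega

-- B = true ↔ Covers
theorem portB_iff (array : List Int) (lo hi : Int) :
    check_elements_in_range_alt array lo hi = true ↔ Covers array lo hi := by
  unfold check_elements_in_range_alt
  by_cases h : lo > hi
  · rw [if_pos h]
    simp only [true_iff]
    intro x hx1 hx2; omega
  · rw [if_neg h]
    have hsort : (PySem.List.sorted array (fun x => x) false).Pairwise (· ≤ ·) := by
      exact PySem.List.sorted_pairwise array (fun x : Int => x)
    rw [scanB_iff hi _ lo hsort (by omega)]
    unfold Covers
    have hmem : ∀ x : Int, x ∈ PySem.List.sorted array (fun x => x) false ↔ x ∈ array := by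
      intro x; simp [PySem.List.mem_sorted]
    constructor
    · intro hc x hx1 hx2; exact (hmem x).mp (hc x hx1 hx2)
    · intro hc x hx1 hx2; exact (hmem x).mpr (hc x hx1 hx2)

-- ===== VERDICT (by name: the statement is the Claim_ definition above) =====
theorem check_elements_in_range_spec : Claim_equal_check_elements_in_range := by
  intro array lo hi _
  unfold Spec_check_elements_in_range
  have hA := portA_iff array lo hi
  have hB := portB_iff array lo hi
  cases hA' : check_elements_in_range array lo hi <;>
    cases hB' : check_elements_in_range_alt array lo hi <;> simp_all
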